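-- pv_equiv track=rewrite | github.com/nastyatonkova/ya_algorithms | sprint_11/Final_tasks/B_Dexterity.py | sleight_of_hand
-- ===== SOURCE A (Python) =====
-- from typing import Dict, Tuple, List
--
-- def get_count_buttons(buttons: str) -> Dict[int, int]:
--     field_buttons = dict()
--     for r in buttons:
--         if r.isdigit():
--             num = r
--             if field_buttons.get(num):
--                 field_buttons[num] += 1
--             else:
--                 field_buttons[num] = 1
--     return field_buttons
--
-- def sleight_of_hand(k: int, buttons: str) -> int:
--     max_points = 0
--     press_buttons = k * 2
--     field_buttons = get_count_buttons(buttons)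
--     for button in field_buttons:
--         count_button = field_buttons.get(button)
--         if count_button <= press_buttons:
--             max_points += 1
--     return max_points
-- ===== SOURCE B (Python) =====
-- def sleight_of_hand(k: int, buttons: str) -> int:
--     ds = sorted(c for c in buttons if c.isdigit())
--     points = 0
--     while ds:
--         c = ds[0]
--         run = 1
--         while run < len(ds) and ds[run] == c:
--             run += 1
--         if run <= 2 * k:
--             points += 1
--         ds = ds[run:]
--     return points
-- ===== Notes on version B (the rewrite author's own statement) =====
-- stated objective: alternative
-- what changed: Replaces A's frequency-dict pass by sort-then-scan: sort the digit characters, then sweep the sorted list once, measuring each run of equal digits and scoring runs of length at most 2*k.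
import Mathlib
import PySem

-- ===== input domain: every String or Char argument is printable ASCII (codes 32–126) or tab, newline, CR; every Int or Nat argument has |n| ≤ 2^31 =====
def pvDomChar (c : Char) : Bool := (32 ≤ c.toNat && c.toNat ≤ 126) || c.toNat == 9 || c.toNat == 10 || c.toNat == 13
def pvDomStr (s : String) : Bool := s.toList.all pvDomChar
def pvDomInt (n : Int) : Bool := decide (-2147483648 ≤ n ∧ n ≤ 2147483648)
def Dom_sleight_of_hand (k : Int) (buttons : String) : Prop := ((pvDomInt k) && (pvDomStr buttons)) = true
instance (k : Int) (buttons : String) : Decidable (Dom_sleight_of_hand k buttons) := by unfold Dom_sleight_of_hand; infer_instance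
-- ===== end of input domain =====

-- B replaces A's frequency-dict pass by sort-then-scan: sort the digit characters and
-- sweep once over runs of equal digits, scoring runs of length ≤ 2*k (objective: alternative).

-- ===== PORT A =====
def get_count_buttons (buttons : String) : PySem.Dict Char Int :=
  buttons.toList.foldl
    (fun d r =>
      if PySem.Chars.isdigit r then
        -- Python: `if field_buttons.get(num):` — get() is None (→ getD 0) or a positive count
        if d.getD r 0 ≠ 0 then d.insert r (d.getD r 0 + 1)
        else d.insert r 1
      else d)
    PySem.Dict.empty

def sleight_of_hand (k : Int) (buttons : String) : Int :=
  let press_buttons := k * 2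
  let field_buttons := get_count_buttons buttons
  field_buttons.keys.foldl
    (fun max_points button =>
      if field_buttons.getD button 0 ≤ press_buttons then max_points + 1 else max_points)
    0

-- ===== PORT B =====
-- the outer `while ds:` loop of Source B: measure the leading run (the inner while = takeWhile),
-- score it, and continue on the remainder `ds[run:]`
def runScan (limit : Int) : List Char → Int
  | [] => 0
  | c :: rest =>
      let run := (rest.takeWhile (fun x => x == c)).length + 1
      (if (run : Int) ≤ limit then 1 else 0) + runScan limit (rest.dropWhile (fun x => x == c))
  termination_by l => l.length
  decreasing_by
    simp only [List.length_cons]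
    exact Nat.lt_succ_of_le (List.length_dropWhile_le _ _)

def sleight_of_hand_alt (k : Int) (buttons : String) : Int :=
  runScan (2 * k)
    (PySem.List.sorted (buttons.toList.filter PySem.Chars.isdigit) (fun x => x) false)

-- ===== PRECONDITION & SPEC =====
def Spec_sleight_of_hand (k : Int) (buttons : String) (out : Int) : Prop := out = sleight_of_hand_alt k buttons
instance (k : Int) (buttons : String) (out : Int) : Decidable (Spec_sleight_of_hand k buttons out) := by unfold Spec_sleight_of_hand; infer_instance

-- ===== CLAIM (what is proved, stated in full; the proofs are below) =====
def Claim_equal_sleight_of_hand : Prop := ∀ (k : Int) (buttons : String), Dom_sleight_of_hand k buttons → Spec_sleight_of_hand k buttons (sleight_of_hand k buttons)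

-- ===== LEMMAS AND PROOFS =====

-- A's dict is exactly the counter of the digit characters of `buttons`
theorem get_count_buttons_eq (buttons : String) :
    get_count_buttons buttons =
      PySem.Dict.counter (buttons.toList.filter PySem.Chars.isdigit) := by
  rw [← PySem.Dict.foldl_insert_getD_add_one_eq_counter, List.foldl_filter]
  unfold get_count_buttons
  congr 1
  funext d r
  by_cases hd : PySem.Chars.isdigit r
  · by_cases h : d.getD r 0 ≠ 0 <;> simp_all
  · simp [hd]

-- in a ≤-sorted list c :: rest, c does not survive dropping its leading run
theorem not_mem_dropWhile_sorted (c : Char) : ∀ (rest : List Char),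
    (c :: rest).Pairwise (· ≤ ·) → c ∉ rest.dropWhile (fun x => x == c) := by
  intro rest
  induction rest with
  | nil => simp
  | cons r rs ih =>
    intro hp
    by_cases hr : r = c
    · subst hr
      have hp' : (r :: rs).Pairwise (· ≤ ·) := by
        have h1 := (List.pairwise_cons.mp hp).1
        have h2 := (List.pairwise_cons.mp hp).2
        exact List.pairwise_cons.mpr ⟨fun x hx => (List.pairwise_cons.mp h2).1 x hx, (List.pairwise_cons.mp h2).2⟩
      simpa [List.dropWhile] using ih hp'
    · have hbe : (r == c) = false := by simp [hr]
      simp only [List.dropWhile, hbe]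
      intro hc
      rcases List.mem_cons.mp hc with h | h
      · exact hr h.symm
      · have h1 : c ≤ r := (List.pairwise_cons.mp hp).1 r (by simp)
        have h2 : r ≤ c := ((List.pairwise_cons.mp (List.pairwise_cons.mp hp).2).1) c h
        exact hr (le_antisymm h2 h1)

-- the run-scan over a ≤-sorted list counts the distinct elements whose multiplicity is ≤ limit
theorem runScan_eq_card (limit : Int) : ∀ (n : Nat) (l : List Char), l.length ≤ n →
    l.Pairwise (· ≤ ·) →
    runScan limit l =
      ((l.toFinset.filter (fun d => (l.count d : Int) ≤ limit)).card : Int) := by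
  intro n
  induction n with
  | zero =>
    intro l hl _
    have : l = [] := List.eq_nil_of_length_eq_zero (Nat.le_zero.mp hl)
    subst this; simp [runScan]
  | succ m ih =>
    intro l hl hp
    match l with
    | [] => simp [runScan]
    | c :: rest =>
      have hrest : rest = rest.takeWhile (fun x => x == c) ++ rest.dropWhile (fun x => x == c) :=
        (List.takeWhile_append_dropWhile).symm
      set run := rest.takeWhile (fun x => x == c) with hrun
      set tail := rest.dropWhile (fun x => x == c) with htail
      have hrunc : ∀ x ∈ run, x = c := by
        intro x hx
        have := List.mem_takeWhile_imp hx
        simpa using this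
      have hcnot : c ∉ tail := not_mem_dropWhile_sorted c rest hp
      have htails : tail.Pairwise (· ≤ ·) := by
        have : tail.Sublist (c :: rest) := (List.dropWhile_sublist _).trans (List.sublist_cons_self _ _)
        exact hp.sublist this
      have hlen : tail.length ≤ m := by
        have h1 : tail.length ≤ rest.length := List.length_dropWhile_le _ _
        have h2 : rest.length + 1 ≤ m + 1 := by simpa using hl
        omega
      -- multiplicity facts
      have hcount_c : (c :: rest).count c = run.length + 1 := by
        have hc1 : run.count c = run.length := by
          rw [List.count_eq_length]
          intro x hx; simp [hrunc x hx]
        have hc2 : tail.count c = 0 := List.count_eq_zero.mpr hcnot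
        rw [List.count_cons_self, hrest, List.count_append, hc1, hc2]
      have hcount_ne : ∀ d, d ≠ c → (c :: rest).count d = tail.count d := by
        intro d hd
        have hr0 : run.count d = 0 := List.count_eq_zero.mpr (fun h => hd (hrunc d h))
        rw [hrest]
        simp [List.count_append, hr0, Ne.symm hd]
      -- finset fact
      have hfin : (c :: rest).toFinset = insert c tail.toFinset := by
        ext x
        simp only [List.toFinset_cons, Finset.mem_insert, List.mem_toFinset]
        constructor
        · rintro (h | h)
          · exact Or.inl h
          · rw [hrest, List.mem_append] at h
            rcases h with h | h
            · exact Or.inl (hrunc x h)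
            · exact Or.inr h
        · rintro (h | h)
          · exact Or.inl h
          · exact Or.inr (by rw [hrest, List.mem_append]; exact Or.inr h)
      have hfilter :
          tail.toFinset.filter (fun d => ((c :: rest).count d : Int) ≤ limit)
            = tail.toFinset.filter (fun d => (tail.count d : Int) ≤ limit) := by
        apply Finset.filter_congr
        intro d hd
        have hdc : d ≠ c := fun h => hcnot (h ▸ List.mem_toFinset.mp hd)
        rw [hcount_ne d hdc]
      rw [runScan]
      rw [ih tail hlen htails]
      rw [hfin, Finset.filter_insert]
      rw [hfilter]
      have hcf : c ∉ tail.toFinset.filter (fun d => (tail.count d : Int) ≤ limit) := by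
        simp only [Finset.mem_filter, List.mem_toFinset]
        exact fun h => hcnot h.1
      by_cases hle : ((run.length + 1 : Nat) : Int) ≤ limit
      · have : ((c :: rest).count c : Int) ≤ limit := by rw [hcount_c]; exact_mod_cast hle
        rw [if_pos hle, if_pos this, Finset.card_insert_of_notMem hcf]
        push_cast; ring
      · have : ¬ ((c :: rest).count c : Int) ≤ limit := by rw [hcount_c]; exact_mod_cast hle
        rw [if_neg hle, if_neg this]
        simp

theorem main_eq (k : Int) (buttons : String) :
    sleight_of_hand k buttons = sleight_of_hand_alt k buttons := by
  unfold sleight_of_hand sleight_of_hand_alt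
  rw [get_count_buttons_eq]
  set ds := buttons.toList.filter PySem.Chars.isdigit with hds
  set srt := PySem.List.sorted ds (fun x => x) false with hsrt
  have hperm : srt.Perm ds := PySem.List.sorted_perm ds (fun x => x) false
  have hpw : srt.Pairwise (· ≤ ·) := by
    have := PySem.List.sorted_pairwise ds (fun x => x)
    simpa using this
  -- B side
  rw [runScan_eq_card (2 * k) srt.length srt le_rfl hpw]
  -- A side: foldl over counter keys becomes a countP over the distinct digits
  rw [PySem.List.foldl_ite_add_one]
  simp only [PySem.Dict.keys_counter, PySem.Dict.getD_counter, zero_add]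
  -- both sides are the cardinality of the same finset
  have hset : (PySem.Set.ofList ds : List Char).Nodup := PySem.Set.nodup_ofList ds
  have hcnt :
      (PySem.Set.ofList ds : List Char).countP (fun c => decide ((ds.count c : Int) ≤ k * 2))
        = ((srt.toFinset.filter (fun d => (srt.count d : Int) ≤ 2 * k)).card) := by
    rw [List.countP_eq_length_filter]
    rw [← List.toFinset_card_of_nodup (hset.filter _)]
    congr 1
    ext d
    simp only [List.mem_toFinset, List.mem_filter, PySem.Set.mem_ofList, Finset.mem_filter,
      decide_eq_true_eq, hperm.count_eq]
    constructor
    · rintro ⟨hm, hle⟩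
      exact ⟨(hperm.mem_iff).mpr hm, by omega⟩
    · rintro ⟨hm, hle⟩
      exact ⟨(hperm.mem_iff).mp hm, by omega⟩
  rw [hcnt]

-- ===== VERDICT (by name: the statement is the Claim_ definition above) =====
theorem sleight_of_hand_spec : Claim_equal_sleight_of_hand := by
  intro k buttons _
  unfold Spec_sleight_of_hand
  exact main_eq k buttons
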